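-- pv_equiv track=rewrite | github.com/Luisrosario2604/Gomoku | src/pbrain-gomoku-ai.py | checkVerticalPoints
-- ===== SOURCE A (Python) =====
-- sizeGame = 18
--
-- def checkVerticalPoints(x, y, board, simbol, rangeMax):
--     size = 0
--     white = 0
--     lastX = -1
--     lastY = -1
--     for i in range(1, 6):
--         if y + i > sizeGame:
--             break
--         elif board[y + i][x] == simbol and i <= rangeMax:
--             size += 1
--             lastX = x
--             lastY = y + i
--         else:
--             if board[y + i][x] != '-':
--                 break
--     if lastX != -1 and lastY != -1 and lastY + 1 <= sizeGame and board[lastY + 1][x] == '-':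
--         white += 1
--     if lastX == -1 and lastY == -1 and y + 1 <= sizeGame and board[y + 1][x] == '-':
--         white += 1
--     lastX = -1
--     lastY = -1
--     for i in range(1, 6):
--         if y - i < 0:
--             break
--         elif board[y - i][x] == simbol and i <= rangeMax:
--             size += 1
--             lastX = x
--             lastY = y - i
--         else:
--             if board[y - i][x] != '-':
--                 break
--     if lastX != -1 and lastY != -1 and lastY - 1 >= 0 and board[lastY - 1][lastX] == '-':
--         white += 1
--     if lastX == -1 and lastY == -1 and y - 1 >= 0 and board[y - 1][x] == '-':
--         white += 1
--     return size, white
-- ===== SOURCE B (Python) =====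
-- sizeGame = 18
--
-- def _runInfo(x, y, board, simbol, rangaMax, dy, i):
--     """Recursively examine steps i..5 in direction dy; return (number of
--     counted cells, row of the farthest counted cell or None), built on the
--     way back up the call chain."""
--     ny = y + dy * i
--     if i > 5 or not (ny <= sizeGame if dy > 0 else ny >= 0):
--         return 0, None
--     cell = board[ny][x]
--     if cell == simbol and i <= rangaMax:
--         size, far = _runInfo(x, y, board, simbol, rangaMax, dy, i + 1)
--         return size + 1, ny if far is None else far
--     if cell == '-':
--         return _runInfo(x, y, board, simbol, rangaMax, dy, i + 1)
--     return 0, None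
--
-- def _openEnd(x, y, board, dy, far):
--     """1 if the cell just past the farthest counted cell (or past (x,y) when
--     nothing was counted) is on the board and empty."""
--     edge = (y if far is None else far) + dy
--     if (edge <= sizeGame if dy > 0 else edge >= 0) and board[edge][x] == '-':
--         return 1
--     return 0
--
-- def checkVerticalPoints(x, y, board, simbol, rangeMax):
--     sizeUp, farUp = _runInfo(x, y, board, simbol, rangeMax, 1, 1)
--     sizeDown, farDown = _runInfo(x, y, board, simbol, rangeMax, -1, 1)
--     return (sizeUp + sizeDown,
--             _openEnd(x, y, board, 1, farUp) + _openEnd(x, y, board, -1, farDown))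
-- ===== Notes on version B (the rewrite author's own statement) =====
-- stated objective: alternative
-- what changed: A's imperative accumulate-and-break loops with lastX/lastY = -1 sentinels are replaced by a recursive descent per direction that returns (count, farthest-matched-row-or-None) back up the call chain, with the open-end flag computed afterwards from that Option value.
-- outside the precondition, e.g. on checkVerticalPoints(-1, 0, [['X'], ['X'], ['-'], ['O']], 'X', 6): A returns (1, 0), B returns (1, 1); on checkVerticalPoints(0, -2, [['-'], ['X']], 'X', 1): A returns (1, 0), B returns (1, 1)
import Mathlib
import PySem

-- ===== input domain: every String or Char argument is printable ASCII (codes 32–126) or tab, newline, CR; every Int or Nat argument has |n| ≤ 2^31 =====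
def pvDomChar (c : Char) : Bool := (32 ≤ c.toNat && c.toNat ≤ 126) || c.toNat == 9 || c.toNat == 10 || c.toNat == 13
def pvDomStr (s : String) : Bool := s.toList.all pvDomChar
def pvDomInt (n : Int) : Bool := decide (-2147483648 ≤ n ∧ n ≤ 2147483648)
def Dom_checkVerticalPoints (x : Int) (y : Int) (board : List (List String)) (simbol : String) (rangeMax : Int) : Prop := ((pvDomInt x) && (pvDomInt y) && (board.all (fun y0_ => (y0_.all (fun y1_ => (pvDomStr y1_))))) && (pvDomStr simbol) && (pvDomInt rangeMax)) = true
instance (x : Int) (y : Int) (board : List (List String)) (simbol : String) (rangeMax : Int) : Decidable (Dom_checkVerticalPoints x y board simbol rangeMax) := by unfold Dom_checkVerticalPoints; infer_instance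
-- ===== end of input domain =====

-- B replaces A's imperative accumulate-and-break loops and -1 sentinels by a
-- recursive descent per direction returning (count, farthest match as Option),
-- with the open-end flag computed afterwards (objective: alternative).

-- board[r][x], total form; Pre_ guarantees every access the programs make is in
-- range (Python negative-index semantics included), so it is exact there
def pvCell (board : List (List String)) (r x : Int) : String :=
  PySem.List.pyGetD (PySem.List.pyGetD board r []) x ""

-- ===== PORT A =====
-- first 'for i in range(1, 6)' loop of A (break = return the state)
def pvALoopUp (x y : Int) (board : List (List String)) (simbol : String) (rangeMax : Int) : List Int → (Int × Int × Int) → (Int × Int × Int)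
  | [], st => st
  | i :: rest, (size, lastX, lastY) =>
    if y + i > 18 then (size, lastX, lastY)
    else if pvCell board (y + i) x = simbol ∧ i ≤ rangeMax then
      pvALoopUp x y board simbol rangeMax rest (size + 1, x, y + i)
    else if pvCell board (y + i) x ≠ "-" then (size, lastX, lastY)
    else pvALoopUp x y board simbol rangeMax rest (size, lastX, lastY)

-- second 'for i in range(1, 6)' loop of A
def pvALoopDown (x y : Int) (board : List (List String)) (simbol : String) (rangeMax : Int) : List Int → (Int × Int × Int) → (Int × Int × Int)
  | [], st => st
  | i :: rest, (size, lastX, lastY) =>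
    if y - i < 0 then (size, lastX, lastY)
    else if pvCell board (y - i) x = simbol ∧ i ≤ rangeMax then
      pvALoopDown x y board simbol rangeMax rest (size + 1, x, y - i)
    else if pvCell board (y - i) x ≠ "-" then (size, lastX, lastY)
    else pvALoopDown x y board simbol rangeMax rest (size, lastX, lastY)

def checkVerticalPoints (x : Int) (y : Int) (board : List (List String)) (simbol : String) (rangeMax : Int) : Int × Int :=
  let st1 := pvALoopUp x y board simbol rangeMax (PySem.List.pyRange 1 6 1) (0, -1, -1)
  let size := st1.1
  let lastX := st1.2.1
  let lastY := st1.2.2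
  let white : Int :=
    (if lastX ≠ -1 ∧ lastY ≠ -1 ∧ lastY + 1 ≤ 18 ∧ pvCell board (lastY + 1) x = "-" then 1 else 0)
    + (if lastX = -1 ∧ lastY = -1 ∧ y + 1 ≤ 18 ∧ pvCell board (y + 1) x = "-" then 1 else 0)
  let st2 := pvALoopDown x y board simbol rangeMax (PySem.List.pyRange 1 6 1) (size, -1, -1)
  let size2 := st2.1
  let lastX2 := st2.2.1
  let lastY2 := st2.2.2
  let white2 := white
    + (if lastX2 ≠ -1 ∧ lastY2 ≠ -1 ∧ lastY2 - 1 ≥ 0 ∧ pvCell board (lastY2 - 1) lastX2 = "-" then 1 else 0)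
    + (if lastX2 = -1 ∧ lastY2 = -1 ∧ y - 1 ≥ 0 ∧ pvCell board (y - 1) x = "-" then 1 else 0)
  (size2, white2)

-- ===== PORT B =====
-- B's _runInfo: recursion on i = 1..5 ('i > 5' becomes the fuel running out)
def pvRunInfo (x y : Int) (board : List (List String)) (simbol : String) (rangeMax dy : Int) : Nat → Int → Int × Option Int
  | 0, _ => (0, none)
  | k + 1, i =>
    let ny := y + dy * i
    if ¬ (if 0 < dy then ny ≤ 18 else 0 ≤ ny) then (0, none)
    else if pvCell board ny x = simbol ∧ i ≤ rangeMax then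
      let r := pvRunInfo x y board simbol rangeMax dy k (i + 1)
      (r.1 + 1, some (r.2.getD ny))
    else if pvCell board ny x = "-" then pvRunInfo x y board simbol rangeMax dy k (i + 1)
    else (0, none)

-- B's _openEnd
def pvOpenEnd (x y : Int) (board : List (List String)) (dy : Int) (far : Option Int) : Int :=
  let edge := far.getD y + dy
  if (if 0 < dy then edge ≤ 18 else 0 ≤ edge) ∧ pvCell board edge x = "-" then 1 else 0

def checkVerticalPoints_alt (x : Int) (y : Int) (board : List (List String)) (simbol : String) (rangeMax : Int) : Int × Int :=
  let u := pvRunInfo x y board simbol rangeMax 1 5 1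
  let d := pvRunInfo x y board simbol rangeMax (-1) 5 1
  (u.1 + d.1, pvOpenEnd x y board 1 u.2 + pvOpenEnd x y board (-1) d.2)

-- ===== PRECONDITION & SPEC =====
-- board[r] exists and board[r][x] exists, under Python's negative-index rule
def pvInR (board : List (List String)) (r x : Int) : Prop :=
  PySem.Raise.InRange board.length r ∧ PySem.Raise.InRange (PySem.List.pyGetD board r []).length x

-- the scan continues past step k (the cell matched in range, or was empty)
def pvContU (x y : Int) (board : List (List String)) (simbol : String) (rangeMax k : Int) : Prop :=
  (pvCell board (y + k) x = simbol ∧ k ≤ rangeMax) ∨ pvCell board (y + k) x = "-"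
def pvContD (x y : Int) (board : List (List String)) (simbol : String) (rangeMax k : Int) : Prop :=
  (pvCell board (y - k) x = simbol ∧ k ≤ rangeMax) ∨ pvCell board (y - k) x = "-"

-- the scan reaches step i: every earlier step was inside the edge, readable and continued
def pvReachU (x y : Int) (board : List (List String)) (simbol : String) (rangeMax i : Int) : Prop :=
  ∀ k ∈ PySem.List.pyRange 1 i 1, y + k ≤ 18 ∧ pvInR board (y + k) x ∧ pvContU x y board simbol rangeMax k
def pvReachD (x y : Int) (board : List (List String)) (simbol : String) (rangeMax i : Int) : Prop :=
  ∀ k ∈ PySem.List.pyRange 1 i 1, 0 ≤ y - k ∧ pvInR board (y - k) x ∧ pvContD x y board simbol rangeMax k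

-- every cell the upward (downward) pass actually reads exists (row y+6 / y-6 is
-- read only by the open-end check, after five matched steps)
def pvSafeU (x y : Int) (board : List (List String)) (simbol : String) (rangeMax : Int) : Prop :=
  (∀ i ∈ PySem.List.pyRange 1 6 1, pvReachU x y board simbol rangeMax i → y + i ≤ 18 → pvInR board (y + i) x) ∧
  (pvReachU x y board simbol rangeMax 6 → pvCell board (y + 5) x = simbol → (5 : Int) ≤ rangeMax → y + 6 ≤ 18 → pvInR board (y + 6) x)
def pvSafeD (x y : Int) (board : List (List String)) (simbol : String) (rangeMax : Int) : Prop :=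
  (∀ i ∈ PySem.List.pyRange 1 6 1, pvReachD x y board simbol rangeMax i → 0 ≤ y - i → pvInR board (y - i) x) ∧
  (pvReachD x y board simbol rangeMax 6 → pvCell board (y - 5) x = simbol → (5 : Int) ≤ rangeMax → 0 ≤ y - 6 → pvInR board (y - 6) x)

-- Pre_ excludes (1) inputs where a scan reads a missing cell (A raises IndexError)
-- and (2) inputs where x = -1, or where a matched cell can be recorded at row -1,
-- so that A's lastX/lastY = -1 sentinel collides with a legitimate Python
-- negative index — an artefact of A's implementation (A still returns there).
def Pre_checkVerticalPoints (x : Int) (y : Int) (board : List (List String)) (simbol : String) (rangeMax : Int) : Prop :=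
  ¬(x = -1 ∧ ∃ i ∈ PySem.List.pyRange 1 6 1, (pvCell board (y + i) x = simbol ∨ pvCell board (y - i) x = simbol) ∧ i ≤ rangeMax) ∧
  ¬(-6 ≤ y ∧ y ≤ -2 ∧ pvCell board (-1) x = simbol ∧ -1 - y ≤ rangeMax) ∧
  pvSafeU x y board simbol rangeMax ∧ pvSafeD x y board simbol rangeMax
instance (x : Int) (y : Int) (board : List (List String)) (simbol : String) (rangeMax : Int) : Decidable (Pre_checkVerticalPoints x y board simbol rangeMax) := by
  unfold Pre_checkVerticalPoints
  refine @instDecidableAnd _ _ ?_ (@instDecidableAnd _ _ ?_ (@instDecidableAnd _ _ ?_ ?_))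
  · infer_instance
  · infer_instance
  · unfold pvSafeU pvReachU pvContU pvInR; infer_instance
  · unfold pvSafeD pvReachD pvContD pvInR; infer_instance

def pvWitness_checkVerticalPoints : Int × Int × List (List String) × String × Int :=
  (0, 4,
   [["-"], ["-"], ["-"], ["-"], ["-"], ["-"], ["-"], ["-"], ["-"], ["-"],
    ["-"], ["-"], ["-"], ["-"], ["-"], ["X"], ["-"], ["-"], ["-"]], "X", 5)

def Spec_checkVerticalPoints (x : Int) (y : Int) (board : List (List String)) (simbol : String) (rangeMax : Int) (out : Int × Int) : Prop := out = checkVerticalPoints_alt x y board simbol rangeMax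
instance (x : Int) (y : Int) (board : List (List String)) (simbol : String) (rangeMax : Int) (out : Int × Int) : Decidable (Spec_checkVerticalPoints x y board simbol rangeMax out) := by unfold Spec_checkVerticalPoints; infer_instance

-- ===== CLAIM (what is proved, stated in full; the proofs are below) =====
def Claim_equal_checkVerticalPoints : Prop := ∀ (x : Int) (y : Int) (board : List (List String)) (simbol : String) (rangeMax : Int), Dom_checkVerticalPoints x y board simbol rangeMax → Pre_checkVerticalPoints x y board simbol rangeMax → Spec_checkVerticalPoints x y board simbol rangeMax (checkVerticalPoints x y board simbol rangeMax)

-- ===== LEMMAS AND PROOFS =====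

-- the list of step indices [i, i+1, …, i+k-1] A's loop still has to process
def pvSteps : Int → Nat → List Int
  | _, 0 => []
  | i, k + 1 => i :: pvSteps (i + 1) k

-- translate B's Option-valued farthest cell into A's (lastX, lastY) pair
def pvToA (x : Int) : Option Int → Int × Int
  | none => (-1, -1)
  | some l => (x, l)

-- A's upward loop over the remaining steps = B's recursion: the count is added
-- on the way back, the farthest match overrides the incoming last pair
lemma pvUp_eq (x y : Int) (board : List (List String)) (simbol : String) (rangeMax : Int) :
    ∀ (k : Nat) (i size : Int) (last : Option Int),
      pvALoopUp x y board simbol rangeMax (pvSteps i k) (size, (pvToA x last).1, (pvToA x last).2)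
        = (size + (pvRunInfo x y board simbol rangeMax 1 k i).1,
           (pvToA x ((pvRunInfo x y board simbol rangeMax 1 k i).2.or last)).1,
           (pvToA x ((pvRunInfo x y board simbol rangeMax 1 k i).2.or last)).2) := by
  intro k
  induction k with
  | zero => intro i size last; simp [pvSteps, pvALoopUp, pvRunInfo]
  | succ k ih =>
    intro i size last
    have hny : y + 1 * i = y + i := by ring
    simp only [pvSteps, pvALoopUp, pvRunInfo, hny]
    by_cases hbr : y + i > 18
    · rw [if_pos hbr, if_pos (show ¬ (if (0:Int) < 1 then y + i ≤ 18 else 0 ≤ y + i) by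
        simp only [show ((0:Int) < 1) = True by simp, if_true]; omega)]
      simp [Option.or]
    · rw [if_neg hbr, if_neg (not_not_intro (show (if (0:Int) < 1 then y + i ≤ 18 else 0 ≤ y + i) by
        simp only [show ((0:Int) < 1) = True by simp, if_true]; omega))]
      by_cases hc : pvCell board (y + i) x = simbol ∧ i ≤ rangeMax
      · rw [if_pos hc, if_pos hc]
        have hih := ih (i + 1) (size + 1) (some (y + i))
        simp only [pvToA, Option.or] at hih ⊢
        rw [hih]
        rcases hr : (pvRunInfo x y board simbol rangeMax 1 k (i + 1)).2 with _ | f <;>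
          simp [Option.getD] <;> ring
      · rw [if_neg hc, if_neg hc]
        by_cases hd : pvCell board (y + i) x = "-"
        · rw [if_neg (not_not_intro hd), if_pos hd]
          exact ih (i + 1) size last
        · rw [if_pos hd, if_neg hd]
          simp [Option.or]

lemma pvDown_eq (x y : Int) (board : List (List String)) (simbol : String) (rangeMax : Int) :
    ∀ (k : Nat) (i size : Int) (last : Option Int),
      pvALoopDown x y board simbol rangeMax (pvSteps i k) (size, (pvToA x last).1, (pvToA x last).2)
        = (size + (pvRunInfo x y board simbol rangeMax (-1) k i).1,
           (pvToA x ((pvRunInfo x y board simbol rangeMax (-1) k i).2.or last)).1,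
           (pvToA x ((pvRunInfo x y board simbol rangeMax (-1) k i).2.or last)).2) := by
  intro k
  induction k with
  | zero => intro i size last; simp [pvSteps, pvALoopDown, pvRunInfo]
  | succ k ih =>
    intro i size last
    have hny : y + (-1) * i = y - i := by ring
    simp only [pvSteps, pvALoopDown, pvRunInfo, hny]
    by_cases hbr : y - i < 0
    · rw [if_pos hbr, if_pos (show ¬ (if (0:Int) < -1 then y - i ≤ 18 else 0 ≤ y - i) by
        simp only [show ((0:Int) < -1) = False by simp, if_false]; omega)]
      simp [Option.or]
    · rw [if_neg hbr, if_neg (not_not_intro (show (if (0:Int) < -1 then y - i ≤ 18 else 0 ≤ y - i) by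
        simp only [show ((0:Int) < -1) = False by simp, if_false]; omega))]
      by_cases hc : pvCell board (y - i) x = simbol ∧ i ≤ rangeMax
      · rw [if_pos hc, if_pos hc]
        have hih := ih (i + 1) (size + 1) (some (y - i))
        simp only [pvToA, Option.or] at hih ⊢
        rw [hih]
        rcases hr : (pvRunInfo x y board simbol rangeMax (-1) k (i + 1)).2 with _ | f <;>
          simp [Option.getD] <;> ring
      · rw [if_neg hc, if_neg hc]
        by_cases hd : pvCell board (y - i) x = "-"
        · rw [if_neg (not_not_intro hd), if_pos hd]
          exact ih (i + 1) size last
        · rw [if_pos hd, if_neg hd]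
          simp [Option.or]

-- the farthest cell, if any, is a matched in-edge cell y + dy * j for a visited j
lemma pvRun_far (x y : Int) (board : List (List String)) (simbol : String) (rangeMax dy : Int) :
    ∀ (k : Nat) (i : Int),
      (pvRunInfo x y board simbol rangeMax dy k i).2 = none ∨
      ∃ j : Int, i ≤ j ∧ j < i + k ∧
        (pvRunInfo x y board simbol rangeMax dy k i).2 = some (y + dy * j) ∧
        (if 0 < dy then y + dy * j ≤ 18 else 0 ≤ y + dy * j) ∧
        pvCell board (y + dy * j) x = simbol ∧ j ≤ rangeMax := by
  intro k
  induction k with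
  | zero => intro i; left; simp [pvRunInfo]
  | succ k ih =>
    intro i
    simp only [pvRunInfo]
    by_cases hbr : (if 0 < dy then y + dy * i ≤ 18 else 0 ≤ y + dy * i)
    · rw [if_neg (not_not_intro hbr)]
      by_cases hc : pvCell board (y + dy * i) x = simbol ∧ i ≤ rangeMax
      · rw [if_pos hc]
        right
        rcases ih (i + 1) with h | ⟨j, hj1, hj2, hj3, hrest⟩
        · exact ⟨i, le_refl i, by omega, by simp [h], hbr, hc.1, hc.2⟩
        · exact ⟨j, by omega, by push_cast at hj2 ⊢; omega, by simp [hj3], hrest⟩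
      · rw [if_neg hc]
        by_cases hd : pvCell board (y + dy * i) x = "-"
        · rw [if_pos hd]
          rcases ih (i + 1) with h | ⟨j, hj1, hj2, hrest⟩
          · left; exact h
          · right; exact ⟨j, by omega, by push_cast at hj2 ⊢; omega, hrest⟩
        · rw [if_neg hd]; left; rfl
    · rw [if_pos hbr]; left; rfl

set_option maxHeartbeats 1000000 in
theorem pv_main (x y : Int) (board : List (List String)) (simbol : String) (rangeMax : Int)
    (hp : Pre_checkVerticalPoints x y board simbol rangeMax) :
    checkVerticalPoints x y board simbol rangeMax = checkVerticalPoints_alt x y board simbol rangeMax := by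
  obtain ⟨hp1, hp2, -, -⟩ := hp
  have hsteps : PySem.List.pyRange 1 6 1 = pvSteps 1 5 := by decide
  rcases hU : pvRunInfo x y board simbol rangeMax 1 5 1 with ⟨su, fu⟩
  rcases hD : pvRunInfo x y board simbol rangeMax (-1) 5 1 with ⟨sd, fd⟩
  have hup := pvUp_eq x y board simbol rangeMax 5 1 0 none
  rw [hU] at hup
  simp only [pvToA, Option.or_none, zero_add] at hup
  have hdn := pvDown_eq x y board simbol rangeMax 5 1 su none
  rw [hD] at hdn
  simp only [pvToA, Option.or_none] at hdn
  have hfu := pvRun_far x y board simbol rangeMax 1 5 1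
  rw [hU] at hfu
  have hfd := pvRun_far x y board simbol rangeMax (-1) 5 1
  rw [hD] at hfd
  simp only at hfu hfd
  simp only [checkVerticalPoints, checkVerticalPoints_alt, pvOpenEnd, hU, hD, hsteps, hup, hdn]
  clear hU hD hup hdn
  rcases hfu with hfu' | ⟨i, hi1, hi2, hfu', hbu, hcu, hru⟩ <;> subst hfu' <;>
    rcases hfd with hfd' | ⟨j, hj1, hj2, hfd', hbd, hcd, hrd⟩ <;> subst hfd'
  · -- no match in either direction
    simp [Option.getD, sub_eq_add_neg]
  · -- match below only
    have hd0 : 0 ≤ y + -1 * j := by simpa using hbd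
    have hjc : pvCell board (y - j) x = simbol := by
      have h : y + -1 * j = y - j := by ring
      rwa [h] at hcd
    have hmem : j ∈ PySem.List.pyRange 1 6 1 := by
      rw [hsteps]; simp [pvSteps]; omega
    have hx' : ¬ x = -1 := fun hxx => hp1 ⟨hxx, j, hmem, Or.inr hjc, hrd⟩
    have hd1 : ¬(y + -j = -1) := by omega
    simp [Option.getD, sub_eq_add_neg, hx', hd1]
  · -- match above only
    have hic : pvCell board (y + i) x = simbol := by
      have h : y + 1 * i = y + i := by ring
      rwa [h] at hcu
    have hmem : i ∈ PySem.List.pyRange 1 6 1 := by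
      rw [hsteps]; simp [pvSteps]; omega
    have hx' : ¬ x = -1 := fun hxx => hp1 ⟨hxx, i, hmem, Or.inl hic, hru⟩
    have hu1 : ¬(y + i = -1) := by
      intro h
      exact hp2 ⟨by omega, by omega, by rw [show (-1 : Int) = y + i by omega]; exact hic, by omega⟩
    simp [Option.getD, sub_eq_add_neg, hx', hu1]
  · -- matches in both directions
    have hd0 : 0 ≤ y + -1 * j := by simpa using hbd
    have hic : pvCell board (y + i) x = simbol := by
      have h : y + 1 * i = y + i := by ring
      rwa [h] at hcu
    have hmemi : i ∈ PySem.List.pyRange 1 6 1 := by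
      rw [hsteps]; simp [pvSteps]; omega
    have hx' : ¬ x = -1 := fun hxx => hp1 ⟨hxx, i, hmemi, Or.inl hic, hru⟩
    have hu1 : ¬(y + i = -1) := by
      intro h
      exact hp2 ⟨by omega, by omega, by rw [show (-1 : Int) = y + i by omega]; exact hic, by omega⟩
    have hd1 : ¬(y + -j = -1) := by omega
    simp [Option.getD, sub_eq_add_neg, hx', hu1, hd1]

-- ===== VERDICT (by name: the statement is the Claim_ definition above) =====
theorem checkVerticalPoints_spec : Claim_equal_checkVerticalPoints := by
  intro x y board simbol rangeMax _ hpre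
  unfold Spec_checkVerticalPoints
  exact pv_main x y board simbol rangeMax hpre
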